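-- pv_equiv track=rewrite | github.com/BaptisteLacroix/Puissance4 | Puissance4Projet.py | extrait_diagonale1
-- ===== SOURCE A (Python) =====
-- def extrait_diagonale1(matrice,x,y):
--     """
--     Extraction de la diagonale
--     """
--     resultat = []
--     ligne = x
--     colonne = y
--     while (ligne>0) and (colonne>0): # remonte au bord
--         ligne = ligne-1
--         colonne = colonne-1
--     while (ligne<len(matrice)) and (colonne<len(matrice[0])): # redescent au bout de la diagonale
--         resultat.append(matrice[ligne][colonne])
--         ligne = ligne+1
--         colonne = colonne+1
--     return resultat
-- ===== SOURCE B (Python) =====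
-- def extrait_diagonale1(matrice, x, y):
--     """
--     Extraction de la diagonale (closed-form start + single comprehension).
--     """
--     off = max(0, min(x, y))
--     i = x - off
--     j = y - off
--     if i < len(matrice):
--         k = min(len(matrice) - i, len(matrice[0]) - j)
--         return [matrice[i + t][j + t] for t in range(k)]
--     return []
-- ===== Notes on version B (the rewrite author's own statement) =====
-- stated objective: simpler
-- what changed: The back-walk while loop is replaced by a closed-form arithmetic offset (off = max(0, min(x, y))), and the forward while loop with an accumulator is replaced by a closed-form element count and a single list comprehension over range(k).
import Mathlib
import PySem

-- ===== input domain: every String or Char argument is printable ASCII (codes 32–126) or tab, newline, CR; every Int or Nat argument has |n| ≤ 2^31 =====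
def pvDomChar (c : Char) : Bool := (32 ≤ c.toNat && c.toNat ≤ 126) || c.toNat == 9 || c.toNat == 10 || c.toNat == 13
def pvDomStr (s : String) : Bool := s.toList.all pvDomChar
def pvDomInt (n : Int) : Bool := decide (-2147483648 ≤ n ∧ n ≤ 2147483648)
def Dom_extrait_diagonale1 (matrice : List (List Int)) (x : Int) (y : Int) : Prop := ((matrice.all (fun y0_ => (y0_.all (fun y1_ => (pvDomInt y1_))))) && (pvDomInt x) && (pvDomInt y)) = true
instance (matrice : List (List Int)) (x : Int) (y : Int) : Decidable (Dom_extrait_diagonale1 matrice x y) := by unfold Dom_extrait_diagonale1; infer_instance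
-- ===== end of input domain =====

-- B replaces A's two successive while loops by a closed-form start offset and one list
-- comprehension over range(k) (objective: simpler).

-- ===== PORT A =====
-- first while loop of A: climb back to the border while both coordinates are > 0
-- (fuel = max number of iterations, (min l c).toNat)
def pvBackA (fuel : Nat) (l c : Int) : Int × Int :=
  match fuel with
  | 0 => (l, c)
  | fuel + 1 =>
    if l > 0 ∧ c > 0 then pvBackA fuel (l - 1) (c - 1) else (l, c)

-- second while loop of A: walk down the diagonal appending matrice[l][c]
-- (indexing ported with pyGet?; the .getD defaults are unreachable under Pre_)
def pvFwdA (matrice : List (List Int)) (fuel : Nat) (l c : Int) (resultat : List Int) : List Int :=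
  match fuel with
  | 0 => resultat
  | fuel + 1 =>
    if l < (matrice.length : Int) ∧ c < ((((PySem.List.pyGet? matrice 0).getD []).length : Int)) then
      pvFwdA matrice fuel (l + 1) (c + 1)
        (resultat ++ [(PySem.List.pyGet? ((PySem.List.pyGet? matrice l).getD []) c).getD 0])
    else resultat

def extrait_diagonale1 (matrice : List (List Int)) (x : Int) (y : Int) : List Int :=
  let p := pvBackA (min x y).toNat x y
  pvFwdA matrice ((matrice.length : Int) - p.1).toNat p.1 p.2 []

-- ===== PORT B =====
def extrait_diagonale1_alt (matrice : List (List Int)) (x : Int) (y : Int) : List Int :=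
  let off := max 0 (min x y)
  let i := x - off
  let j := y - off
  if i < (matrice.length : Int) then
    let k := min ((matrice.length : Int) - i) ((((PySem.List.pyGet? matrice 0).getD []).length : Int) - j)
    (PySem.List.pyRange 0 k 1).map (fun t =>
      (PySem.List.pyGet? ((PySem.List.pyGet? matrice (x - max 0 (min x y) + t)).getD []) (y - max 0 (min x y) + t)).getD 0)
  else []

-- ===== PRECONDITION & SPEC =====
-- Pre_ excludes exactly the inputs on which the Python A raises an IndexError: an empty
-- matrix reached with a negative row start (len(matrice[0]) is evaluated), or a visited
-- cell whose (possibly negative, Python-wrapping) indices fall outside the actual row.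
-- The proved equality in fact holds even outside Pre_, where both ports use the same
-- defaults; Pre_ only marks where the Python A returns normally.
def Pre_extrait_diagonale1 (matrice : List (List Int)) (x : Int) (y : Int) : Prop :=
  (matrice = [] → 0 ≤ x) ∧
  (matrice ≠ [] →
    0 < min ((matrice.length : Int) - (x - max 0 (min x y)))
            ((((PySem.List.pyGet? matrice 0).getD []).length : Int) - (y - max 0 (min x y))) →
      -(matrice.length : Int) ≤ x - max 0 (min x y) ∧
      ∀ k : Nat, k < (min ((matrice.length : Int) - (x - max 0 (min x y)))
                         ((((PySem.List.pyGet? matrice 0).getD []).length : Int) - (y - max 0 (min x y)))).toNat →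
        -((((PySem.List.pyGet? matrice (x - max 0 (min x y) + k)).getD []).length : Int)) ≤ y - max 0 (min x y) + k ∧
        y - max 0 (min x y) + k < (((PySem.List.pyGet? matrice (x - max 0 (min x y) + k)).getD []).length : Int))
instance (matrice : List (List Int)) (x : Int) (y : Int) : Decidable (Pre_extrait_diagonale1 matrice x y) := by
  unfold Pre_extrait_diagonale1; infer_instance

def pvWitness_extrait_diagonale1 : List (List Int) × Int × Int := ([[1, 2], [3, 4]], 0, 1)

def Spec_extrait_diagonale1 (matrice : List (List Int)) (x : Int) (y : Int) (out : List Int) : Prop := out = extrait_diagonale1_alt matrice x y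
instance (matrice : List (List Int)) (x : Int) (y : Int) (out : List Int) : Decidable (Spec_extrait_diagonale1 matrice x y out) := by unfold Spec_extrait_diagonale1; infer_instance

-- ===== CLAIM (what is proved, stated in full; the proofs are below) =====
def Claim_equal_extrait_diagonale1 : Prop := ∀ (matrice : List (List Int)) (x : Int) (y : Int), Dom_extrait_diagonale1 matrice x y → Pre_extrait_diagonale1 matrice x y → Spec_extrait_diagonale1 matrice x y (extrait_diagonale1 matrice x y)

-- ===== LEMMAS AND PROOFS =====

-- A's back-walk loop computes the closed-form start used by B
theorem pvBackA_eq (fuel : Nat) : ∀ (l c : Int), (min l c).toNat ≤ fuel →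
    pvBackA fuel l c = (l - max 0 (min l c), c - max 0 (min l c)) := by
  induction fuel with
  | zero =>
    intro l c h
    have : max 0 (min l c) = 0 := by omega
    simp [pvBackA, this]
  | succ fuel ih =>
    intro l c h
    by_cases hg : l > 0 ∧ c > 0
    · have h1 : (min (l - 1) (c - 1)).toNat ≤ fuel := by omega
      have := ih (l - 1) (c - 1) h1
      simp only [pvBackA, if_pos hg, this]
      have hmin : (0:Int) < min l c := by omega
      simp only [Prod.mk.injEq]
      constructor <;> omega
    · have : max 0 (min l c) = 0 := by omega
      simp [pvBackA, if_neg hg, this]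

-- A's forward loop equals B's map over range, for any sufficient fuel
theorem pvFwdA_eq (matrice : List (List Int)) (fuel : Nat) :
    ∀ (i j : Int) (resultat : List Int), ((matrice.length : Int) - i).toNat ≤ fuel →
    pvFwdA matrice fuel i j resultat =
      resultat ++ (PySem.List.pyRange 0
          (min ((matrice.length : Int) - i)
               ((((PySem.List.pyGet? matrice 0).getD []).length : Int) - j)) 1).map
        (fun t => (PySem.List.pyGet? ((PySem.List.pyGet? matrice (i + t)).getD []) (j + t)).getD 0) := by
  induction fuel with
  | zero =>
    intro i j resultat h
    have hnil : min ((matrice.length : Int) - i)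
        ((((PySem.List.pyGet? matrice 0).getD []).length : Int) - j) ≤ 0 := by omega
    simp [pvFwdA, PySem.List.pyRange_one_eq_nil hnil]
  | succ fuel ih =>
    intro i j resultat h
    by_cases hg : i < (matrice.length : Int) ∧ j < ((((PySem.List.pyGet? matrice 0).getD []).length : Int))
    · have h1 : ((matrice.length : Int) - (i + 1)).toNat ≤ fuel := by omega
      have hIH := ih (i + 1) (j + 1)
        (resultat ++ [(PySem.List.pyGet? ((PySem.List.pyGet? matrice i).getD []) j).getD 0]) h1
      rw [pvFwdA, if_pos hg, hIH]
      have hpos : (0:Int) < min ((matrice.length : Int) - i)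
          ((((PySem.List.pyGet? matrice 0).getD []).length : Int) - j) := by omega
      rw [PySem.List.pyRange_one_cons hpos]
      have hshift : min ((matrice.length : Int) - (i + 1))
            ((((PySem.List.pyGet? matrice 0).getD []).length : Int) - (j + 1))
          = min ((matrice.length : Int) - i)
            ((((PySem.List.pyGet? matrice 0).getD []).length : Int) - j) - 1 := by omega
      rw [hshift, PySem.List.pyRange_one, PySem.List.pyRange_one]
      simp only [List.map_map, List.map_cons, List.append_assoc, List.cons_append,
        List.nil_append, add_zero, sub_zero, zero_add]
      congr 1
      refine congrArg (fun zs => _ :: zs) ?_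
      refine List.map_congr_left fun k _ => ?_
      simp only [Function.comp_apply]
      have e1 : i + 1 + (k : Int) = i + (1 + (k : Int)) := by ring
      have e2 : j + 1 + (k : Int) = j + (1 + (k : Int)) := by ring
      rw [e1, e2]
    · have hnil : min ((matrice.length : Int) - i)
          ((((PySem.List.pyGet? matrice 0).getD []).length : Int) - j) ≤ 0 := by omega
      rw [pvFwdA, if_neg hg, PySem.List.pyRange_one_eq_nil hnil]
      simp

-- ===== VERDICT (by name: the statement is the Claim_ definition above) =====
theorem extrait_diagonale1_spec : Claim_equal_extrait_diagonale1 := by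
  intro matrice x y _hdom _hpre
  unfold Spec_extrait_diagonale1 extrait_diagonale1 extrait_diagonale1_alt
  rw [pvBackA_eq (min x y).toNat x y (le_refl _)]
  rw [pvFwdA_eq matrice _ _ _ _ (le_refl _)]
  by_cases hiL : x - max 0 (min x y) < (matrice.length : Int)
  · rw [if_pos hiL]
    simp
  · rw [if_neg hiL]
    have hnil : min ((matrice.length : Int) - (x - max 0 (min x y)))
        ((((PySem.List.pyGet? matrice 0).getD []).length : Int) - (y - max 0 (min x y))) ≤ 0 := by omega
    rw [PySem.List.pyRange_one_eq_nil hnil]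
    simp
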